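-- pv_equiv track=rewrite | github.com/TianleJin/Algorithmic-Contests-Solutions | Google-Code-Jam-2019/Round-A/a.py | solve
-- ===== SOURCE A (Python) =====
-- class Trie:
--     def __init__(self):
--         self.cnt = 0
--         self.children = dict()
--
-- def solve(n, words):
--     trie = Trie()
--
--     for word in words:
--         curr = trie
--         for i in range(len(word) - 1, -1, -1):
--             if word[i] not in curr.children:
--                 curr.children[word[i]] = Trie()
--             curr = curr.children[word[i]]
--         curr.cnt += 1
--
--     ans = [0]
--
--     def dfs(node):
--         for ch in node.children.values():
--             dfs(ch)
--             node.cnt += ch.cnt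
--
--         if node is not trie and node.cnt >= 2:
--             ans[0] += 2
--             node.cnt -= 2
--
--     dfs(trie)
--     return ans[0]
-- ===== SOURCE B (Python) =====
-- def solve(n, words):
--     # Recursive grouping on reversed words instead of building an explicit trie.
--     def go(items):
--         cnt = 0
--         groups = {}
--         for it in items:
--             if it:
--                 groups.setdefault(it[0], []).append(it[1:])
--             else:
--                 cnt += 1
--         ans = 0
--         for g in groups.values():
--             a, l = go(g)
--             ans += a
--             cnt += l
--         if cnt >= 2:
--             ans += 2
--             cnt -= 2
--         return ans, cnt
--
--     groups = {}
--     for w in words: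
--         r = w[::-1]
--         if r:
--             groups.setdefault(r[0], []).append(r[1:])
--     total = 0
--     for g in groups.values():
--         total += go(g)[0]
--     return total
-- ===== Notes on version B (the rewrite author's own statement) =====
-- stated objective: alternative
-- what changed: Replaces A's explicit suffix-trie construction (node objects with a child dict, built by per-character insertion, then a mutating DFS) by a direct recursive partition of the reversed words: group the words by their next character from the end, recurse into each group, and pair leftovers per group boundary; no trie is ever materialised.
import Mathlib
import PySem

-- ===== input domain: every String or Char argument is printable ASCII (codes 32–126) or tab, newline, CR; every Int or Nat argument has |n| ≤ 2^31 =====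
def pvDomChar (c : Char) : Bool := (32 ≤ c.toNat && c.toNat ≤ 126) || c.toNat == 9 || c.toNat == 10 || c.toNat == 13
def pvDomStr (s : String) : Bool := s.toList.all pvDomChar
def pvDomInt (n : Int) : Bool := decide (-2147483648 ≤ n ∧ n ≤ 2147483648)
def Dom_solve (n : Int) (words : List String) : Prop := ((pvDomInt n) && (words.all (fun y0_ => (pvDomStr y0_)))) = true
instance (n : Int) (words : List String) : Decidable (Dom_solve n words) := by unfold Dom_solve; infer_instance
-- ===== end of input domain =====

-- B replaces A's explicit suffix-trie (objects + child dict + mutating DFS) by a direct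
-- recursive partition of the reversed words by next character; same result, no trie built.

-- ===== PORT A =====
-- A's Trie class: cnt + children dict (insertion order); encoded as a mutual inductive
-- (an explicit child list instead of a nested List in the constructor).
mutual
inductive TrieA where
  | mk : Int → ChildrenA → TrieA
deriving Repr
inductive ChildrenA where
  | nil : ChildrenA
  | cons : Char → TrieA → ChildrenA → ChildrenA
deriving Repr
end

-- 'if word[i] not in curr.children: children[word[i]] = Trie()' then descend: get-or-create
def updAt (c : Char) (f : TrieA → TrieA) : ChildrenA → ChildrenA
  | .nil => .cons c (f (.mk 0 .nil)) .nil
  | .cons c' t rest => if c' = c then .cons c' (f t) rest else .cons c' t (updAt c f rest)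

-- the inner 'for i in range(len(word)-1,-1,-1)' loop: walk the reversed word, then cnt += 1
def insertA : List Char → TrieA → TrieA
  | [], .mk n ch => .mk (n + 1) ch
  | c :: rest, .mk n ch => .mk n (updAt c (insertA rest) ch)

-- A's dfs: returns (ans contributed, node.cnt after mutation); 'node is not trie' = the Bool flag
mutual
def dfsA : Bool → TrieA → Int × Int
  | isRoot, .mk n ch =>
    let p := dfsChildrenA ch
    let cnt := n + p.2
    if isRoot = false ∧ cnt ≥ 2 then (p.1 + 2, cnt - 2) else (p.1, cnt)
def dfsChildrenA : ChildrenA → Int × Int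
  | .nil => (0, 0)
  | .cons _ t rest =>
    let q := dfsA false t
    let r := dfsChildrenA rest
    (q.1 + r.1, q.2 + r.2)
end

def solve (n : Int) (words : List String) : Int :=
  let trie := words.foldl (fun T w => insertA w.toList.reverse T) (.mk 0 .nil)
  (dfsA true trie).1

-- ===== PORT B =====
-- groups.setdefault(it[0], []).append(it[1:])  (dict in first-occurrence order)
def addGroupB (gs : List (Char × List (List Char))) (c : Char) (t : List Char) :
    List (Char × List (List Char)) :=
  match gs with
  | [] => [(c, [t])]
  | (c', g) :: rest => if c' = c then (c', g ++ [t]) :: rest else (c', g) :: addGroupB rest c t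

-- the first loop of go: count empty items, group the rest by head character
def partStepB (s : Int × List (Char × List (List Char))) (it : List Char) :
    Int × List (Char × List (List Char)) :=
  match it with
  | [] => (s.1 + 1, s.2)
  | c :: t => (s.1, addGroupB s.2 c t)

-- go(items) of Source B; the Nat fuel is only a totality guard (proved sufficient below)
def goB : Nat → List (List Char) → Int × Int
  | 0, _ => (0, 0)
  | fuel + 1, items =>
    let s := items.foldl partStepB (0, [])
    let r := s.2.foldl (fun (acc : Int × Int) p =>
        let q := goB fuel p.2
        (acc.1 + q.1, acc.2 + q.2)) ((0 : Int), s.1)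
    if r.2 ≥ 2 then (r.1 + 2, r.2 - 2) else r

def fuelB (words : List String) : Nat := words.foldl (fun a w => a + w.length + 1) 0

def solve_alt (n : Int) (words : List String) : Int :=
  let gs := words.foldl (fun gs w =>
      match w.toList.reverse with
      | [] => gs
      | c :: t => addGroupB gs c t) ([] : List (Char × List (List Char)))
  gs.foldl (fun total p => total + (goB (fuelB words) p.2).1) 0

-- ===== PRECONDITION & SPEC =====
def Spec_solve (n : Int) (words : List String) (out : Int) : Prop := out = solve_alt n words
instance (n : Int) (words : List String) (out : Int) : Decidable (Spec_solve n words out) := by unfold Spec_solve; infer_instance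

-- ===== CLAIM (what is proved, stated in full; the proofs are below) =====
def Claim_equal_solve : Prop := ∀ (n : Int) (words : List String), Dom_solve n words → Spec_solve n words (solve n words)

-- ===== LEMMAS AND PROOFS =====

-- trie built from a list of (reversed-word) char lists
def buildL (items : List (List Char)) : TrieA :=
  items.foldl (fun T it => insertA it T) (.mk 0 .nil)

-- children list corresponding to a grouping
def fromGroups : List (Char × List (List Char)) → ChildrenA
  | [] => .nil
  | (c, g) :: rest => .cons c (buildL g) (fromGroups rest)

-- size measures
def Mw (items : List (List Char)) : Nat := (items.map (fun it => it.length + 1)).sum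
def TW (gs : List (Char × List (List Char))) : Nat := (gs.map (fun p => Mw p.2)).sum

theorem buildL_append_one (g : List (List Char)) (t : List Char) :
    buildL (g ++ [t]) = insertA t (buildL g) := by
  simp [buildL, List.foldl_append]

theorem updAt_fromGroups (c : Char) (t : List Char) (gs : List (Char × List (List Char))) :
    updAt c (insertA t) (fromGroups gs) = fromGroups (addGroupB gs c t) := by
  induction gs with
  | nil => simp [fromGroups, updAt, addGroupB, buildL]
  | cons p rest ih =>
    obtain ⟨c', g⟩ := p
    by_cases h : c' = c
    · simp [fromGroups, updAt, addGroupB, h, buildL_append_one]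
    · simp [fromGroups, updAt, addGroupB, h, ih]

theorem insertA_char (it : List Char) (m : Int) (gs : List (Char × List (List Char))) :
    insertA it (.mk m (fromGroups gs)) =
      .mk ((partStepB (m, gs) it).1) (fromGroups ((partStepB (m, gs) it).2)) := by
  cases it with
  | nil => simp [insertA, partStepB]
  | cons c t => simp [insertA, partStepB, updAt_fromGroups]

-- characterization: the built trie is the grouping of the items
theorem buildL_char (items : List (List Char)) (m : Int) (gs : List (Char × List (List Char))) :
    items.foldl (fun T it => insertA it T) (.mk m (fromGroups gs)) =
      .mk ((items.foldl partStepB (m, gs)).1) (fromGroups ((items.foldl partStepB (m, gs)).2)) := by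
  induction items generalizing m gs with
  | nil => simp
  | cons it rest ih =>
    simp only [List.foldl_cons, insertA_char]
    exact ih _ _

theorem TW_addGroupB (gs : List (Char × List (List Char))) (c : Char) (t : List Char) :
    TW (addGroupB gs c t) = TW gs + (t.length + 1) := by
  induction gs with
  | nil => simp [addGroupB, TW, Mw]
  | cons p rest ih =>
    obtain ⟨c', g⟩ := p
    by_cases h : c' = c
    · simp [addGroupB, h, TW, Mw]; omega
    · simp [addGroupB, h, TW] at *; omega

theorem TW_foldl (items : List (List Char)) (m : Int) (gs : List (Char × List (List Char))) :
    TW ((items.foldl partStepB (m, gs)).2) + items.length ≤ TW gs + Mw items := by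
  induction items generalizing m gs with
  | nil => simp [Mw]
  | cons it rest ih =>
    cases it with
    | nil =>
      simp only [List.foldl_cons, partStepB]
      have := ih (m + 1) gs
      simp [Mw, List.length_cons] at *; omega
    | cons c t =>
      simp only [List.foldl_cons, partStepB]
      have := ih m (addGroupB gs c t)
      rw [TW_addGroupB] at this
      simp [Mw, List.length_cons] at *; omega

theorem mem_TW {gs : List (Char × List (List Char))} {p : Char × List (List Char)}
    (h : p ∈ gs) : Mw p.2 ≤ TW gs := by
  induction gs with
  | nil => cases h
  | cons q rest ih =>
    rcases List.mem_cons.1 h with h | h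
    · simp [TW, h]
    · have := ih h; simp [TW] at *; omega

-- any group produced by the partition is strictly smaller than the item list
theorem group_small {items : List (List Char)} {p : Char × List (List Char)}
    (h : p ∈ (items.foldl partStepB ((0 : Int), [])).2) : Mw p.2 < Mw items := by
  have h1 : Mw p.2 ≤ TW ((items.foldl partStepB ((0 : Int), [])).2) := mem_TW h
  have h2 := TW_foldl items 0 []
  have h3 : items ≠ [] := by
    intro e; subst e; simp at h
  have h4 : 1 ≤ items.length := by
    cases items with
    | nil => exact absurd rfl h3
    | cons it rest => simp
  have h5 : TW ([] : List (Char × List (List Char))) = 0 := by simp [TW]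
  omega

-- fold over groups: sums of the per-group results
theorem fold_groups (fuel : Nat) (gs : List (Char × List (List Char))) (x y : Int)
    (h : ∀ p ∈ gs, goB fuel p.2 = dfsA false (buildL p.2)) :
    gs.foldl (fun (acc : Int × Int) p =>
        let q := goB fuel p.2
        (acc.1 + q.1, acc.2 + q.2)) (x, y) =
      (x + (dfsChildrenA (fromGroups gs)).1, y + (dfsChildrenA (fromGroups gs)).2) := by
  induction gs generalizing x y with
  | nil => simp [fromGroups, dfsChildrenA]
  | cons p rest ih =>
    obtain ⟨c, g⟩ := p
    have hp := h (c, g) (by simp)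
    simp only [List.foldl_cons]
    rw [ih _ _ (fun q hq => h q (by simp [hq]))]
    simp only [fromGroups, dfsChildrenA, hp]
    simp [add_assoc]

-- main lemma: go equals dfs over the built trie, given enough fuel
theorem go_eq_dfs (fuel : Nat) : ∀ items : List (List Char), Mw items ≤ fuel →
    goB fuel items = dfsA false (buildL items) := by
  induction fuel with
  | zero =>
    intro items h
    have : items = [] := by
      cases items with
      | nil => rfl
      | cons it rest => simp [Mw] at h
    subst this
    simp [goB, buildL, dfsA, dfsChildrenA]
  | succ fuel ih =>
    intro items h
    have hb : buildL items =
        .mk ((items.foldl partStepB ((0 : Int), [])).1)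
            (fromGroups ((items.foldl partStepB ((0 : Int), [])).2)) := by
      unfold buildL
      exact buildL_char items 0 []
    have hrec : ∀ p ∈ (items.foldl partStepB ((0 : Int), [])).2,
        goB fuel p.2 = dfsA false (buildL p.2) := by
      intro p hp
      have := group_small hp
      exact ih p.2 (by omega)
    simp only [goB, hb]
    rw [fold_groups fuel _ 0 _ hrec]
    simp only [dfsA]
    simp [zero_add]

theorem root_groups (words : List String) (m : Int) (gs0 : List (Char × List (List Char))) :
    (words.foldl (fun s w => partStepB s w.toList.reverse) (m, gs0)).2 =
      words.foldl (fun gs w =>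
        match w.toList.reverse with
        | [] => gs
        | c :: t => addGroupB gs c t) gs0 := by
  induction words generalizing m gs0 with
  | nil => rfl
  | cons w rest ih =>
    simp only [List.foldl_cons]
    cases hw : w.toList.reverse with
    | nil => simp only [partStepB]; exact ih _ _
    | cons c t => simp only [partStepB]; exact ih _ _

theorem fold_groups1 (F : Nat) (gs : List (Char × List (List Char))) (x : Int)
    (h : ∀ p ∈ gs, goB F p.2 = dfsA false (buildL p.2)) :
    gs.foldl (fun total p => total + (goB F p.2).1) x =
      x + (dfsChildrenA (fromGroups gs)).1 := by
  induction gs generalizing x with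
  | nil => simp [fromGroups, dfsChildrenA]
  | cons p rest ih =>
    obtain ⟨c, g⟩ := p
    have hp := h (c, g) (by simp)
    simp only [List.foldl_cons]
    rw [ih _ (fun q hq => h q (by simp [hq]))]
    simp only [fromGroups, dfsChildrenA, hp]
    ring

theorem fuelB_eq (words : List String) :
    fuelB words = Mw (words.map (fun w => w.toList.reverse)) := by
  have gen : ∀ (ws : List String) (a : Nat),
      ws.foldl (fun a w => a + w.length + 1) a =
        a + Mw (ws.map (fun w => w.toList.reverse)) := by
    intro ws
    induction ws with
    | nil => intro a; simp [Mw]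
    | cons w rest ih =>
      intro a
      simp only [List.foldl_cons, List.map_cons]
      rw [ih]
      simp [Mw]
      omega
  have := gen words 0
  simpa [fuelB] using this

theorem solve_eq (n : Int) (words : List String) : solve n words = solve_alt n words := by
  unfold solve solve_alt
  have hmap : words.foldl (fun T w => insertA w.toList.reverse T) (.mk 0 .nil) =
      buildL (words.map (fun w => w.toList.reverse)) := by
    unfold buildL
    rw [List.foldl_map]
  have hb : buildL (words.map (fun w => w.toList.reverse)) =
      .mk (((words.map (fun w => w.toList.reverse)).foldl partStepB ((0 : Int), [])).1)
          (fromGroups (((words.map (fun w => w.toList.reverse)).foldl partStepB ((0 : Int), [])).2)) := by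
    unfold buildL
    exact buildL_char _ 0 []
  have hs : (words.map (fun w => w.toList.reverse)).foldl partStepB ((0 : Int), []) =
      words.foldl (fun s w => partStepB s w.toList.reverse) ((0 : Int), []) := by
    rw [List.foldl_map]
  have hg := root_groups words 0 []
  have hrec : ∀ p ∈ ((words.map (fun w => w.toList.reverse)).foldl partStepB ((0 : Int), [])).2,
      goB (fuelB words) p.2 = dfsA false (buildL p.2) := by
    intro p hp
    have h1 := group_small hp
    rw [← fuelB_eq] at h1
    exact go_eq_dfs _ p.2 (by omega)
  rw [hmap, hb]
  rw [← hg, ← hs]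
  rw [fold_groups1 _ _ 0 hrec]
  simp [dfsA]

-- ===== VERDICT (by name: the statement is the Claim_ definition above) =====
theorem solve_spec : Claim_equal_solve := by
  intro n words _
  unfold Spec_solve
  exact solve_eq n words
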